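-- pv_equiv track=rewrite | github.com/ricardobdenadai01/roteiro-ia | app/sector_mapper.py | _infer_sector_from_campaign
-- ===== SOURCE A (Python) =====
-- SETOR_NAO_IDENTIFICADO = "Setor Não Identificado"
--
-- def _infer_sector_from_campaign(campaign_name: str, mappings: dict[str, str]) -> str:
--     """Tenta inferir o setor a partir do nome da campanha usando palavras-chave."""
--     if not campaign_name:
--         return SETOR_NAO_IDENTIFICADO
--
--     campaign_upper = campaign_name.upper()
--     sorted_keys = sorted(mappings.keys(), key=len, reverse=True)
--     for keyword in sorted_keys:
--         if keyword.upper() in campaign_upper: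
--             return mappings[keyword]
--
--     return SETOR_NAO_IDENTIFICADO
-- ===== SOURCE B (Python) =====
-- SETOR_NAO_IDENTIFICADO = "Setor Não Identificado"
--
--
-- def _infer_sector_from_campaign(campaign_name: str, mappings: dict[str, str]) -> str:
--     """Single pass over the items, keeping the longest matching keyword (first wins ties)."""
--     if not campaign_name:
--         return SETOR_NAO_IDENTIFICADO
--
--     campaign_upper = campaign_name.upper()
--     best_len = -1
--     best_sector = SETOR_NAO_IDENTIFICADO
--     for keyword, sector in mappings.items():
--         if best_len < len(keyword) and keyword.upper() in campaign_upper: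
--             best_len = len(keyword)
--             best_sector = sector
--     return best_sector
-- ===== Notes on version B (the rewrite author's own statement) =====
-- stated objective: simpler
-- what changed: Replaced the length-sort of all keys followed by a first-match scan with a single pass over the items that keeps the strictly-longest matching keyword (strict comparison preserves A's stable reverse-sort tie-break), removing the sort and the dict lookup.
import Mathlib
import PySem

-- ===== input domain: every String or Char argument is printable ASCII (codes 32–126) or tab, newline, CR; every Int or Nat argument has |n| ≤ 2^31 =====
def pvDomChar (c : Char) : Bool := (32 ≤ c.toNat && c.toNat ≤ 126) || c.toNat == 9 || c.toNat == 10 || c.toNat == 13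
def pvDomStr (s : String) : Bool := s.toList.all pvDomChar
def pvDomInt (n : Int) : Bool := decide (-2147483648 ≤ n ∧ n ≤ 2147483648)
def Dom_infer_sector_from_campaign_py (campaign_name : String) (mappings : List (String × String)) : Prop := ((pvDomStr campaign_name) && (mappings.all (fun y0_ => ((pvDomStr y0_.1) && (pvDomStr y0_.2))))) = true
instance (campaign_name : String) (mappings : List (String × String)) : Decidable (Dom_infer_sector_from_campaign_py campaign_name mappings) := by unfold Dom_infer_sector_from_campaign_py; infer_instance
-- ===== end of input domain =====

-- ===== PORT A =====
-- B drops the sort and keeps the longest matching keyword in one pass; objective: simpler.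
def pvSETOR : String := "Setor Não Identificado"

-- the 'for keyword in sorted_keys: …' loop of A
def pvALoop (d : PySem.Dict String String) (campaign_upper : String) : List String → String
  | [] => pvSETOR
  | keyword :: rest =>
      if PySem.Str.isIn (PySem.Str.upper keyword) campaign_upper then d.getD keyword ""
      else pvALoop d campaign_upper rest

def infer_sector_from_campaign_py (campaign_name : String) (mappings : List (String × String)) : String :=
  if campaign_name = "" then pvSETOR
  else
    let d := PySem.Dict.ofList mappings
    let campaign_upper := PySem.Str.upper campaign_name
    let sorted_keys := PySem.List.sorted d.keys (fun k => PySem.Str.len k) true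
    pvALoop d campaign_upper sorted_keys

-- ===== PORT B =====
-- the body of B's 'for keyword, sector in mappings.items(): …' loop
def pvBStep (campaign_upper : String) (b : Int × String) (kv : String × String) : Int × String :=
  if b.1 < PySem.Str.len kv.1 && PySem.Str.isIn (PySem.Str.upper kv.1) campaign_upper
  then (PySem.Str.len kv.1, kv.2) else b

def infer_sector_from_campaign_py_alt (campaign_name : String) (mappings : List (String × String)) : String :=
  if campaign_name = "" then pvSETOR
  else
    let campaign_upper := PySem.Str.upper campaign_name
    ((PySem.Dict.ofList mappings).items.foldl (pvBStep campaign_upper) (-1, pvSETOR)).2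

-- ===== PRECONDITION & SPEC =====
def Spec_infer_sector_from_campaign_py (campaign_name : String) (mappings : List (String × String)) (out : String) : Prop := out = infer_sector_from_campaign_py_alt campaign_name mappings
instance (campaign_name : String) (mappings : List (String × String)) (out : String) : Decidable (Spec_infer_sector_from_campaign_py campaign_name mappings out) := by unfold Spec_infer_sector_from_campaign_py; infer_instance

-- ===== CLAIM (what is proved, stated in full; the proofs are below) =====
def Claim_equal_infer_sector_from_campaign_py : Prop := ∀ (campaign_name : String) (mappings : List (String × String)), Dom_infer_sector_from_campaign_py campaign_name mappings → Spec_infer_sector_from_campaign_py campaign_name mappings (infer_sector_from_campaign_py campaign_name mappings)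

-- ===== LEMMAS AND PROOFS =====

-- the matching predicate both loops decide
def pvP (campaign_upper keyword : String) : Bool :=
  PySem.Str.isIn (PySem.Str.upper keyword) campaign_upper

-- A's loop is the first match of the list, looked up in the dict
lemma pvALoop_eq_find? (d : PySem.Dict String String) (cu : String) (s : List String) :
    pvALoop d cu s = (match s.find? (pvP cu) with
      | none => pvSETOR
      | some k => d.getD k "") := by
  induction s with
  | nil => rfl
  | cons k rest ih =>
      simp only [pvALoop]
      by_cases h : PySem.Str.isIn (PySem.Str.upper k) cu = true
      · rw [if_pos h, List.find?_cons_of_pos (show pvP cu k = true from h)]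
      · rw [if_neg h, ih, List.find?_cons_of_neg (show ¬ pvP cu k = true from h)]

-- the fold state B maintains, phrased through the first match of a (sorted) key list
def pvStOf (d : PySem.Dict String String) (cu : String) (s : List String) : Int × String :=
  match s.find? (pvP cu) with
  | none => (-1, pvSETOR)
  | some k => (PySem.Str.len k, d.getD k "")

lemma pv_len_nonneg (k : String) : 0 ≤ PySem.Str.len k := by
  rw [PySem.Str.len_eq]; positivity

-- first match of an insertBy step into a length-descending list
lemma pv_find?_insertBy (P : String → Bool) (x : String) (s : List String)
    (hp : s.Pairwise (fun a b => PySem.Str.len b ≤ PySem.Str.len a)) :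
    (PySem.List.insertBy (fun a b => decide (PySem.Str.len b < PySem.Str.len a)) x s).find? P =
      (match s.find? P with
        | none => if P x then some x else none
        | some k0 => if P x && decide (PySem.Str.len k0 < PySem.Str.len x) then some x
                     else some k0) := by
  induction s with
  | nil =>
      simp [PySem.List.insertBy, List.find?]
  | cons y ys ih =>
      have hy : ∀ b ∈ ys, PySem.Str.len b ≤ PySem.Str.len y := (List.pairwise_cons.mp hp).1
      have hp' : ys.Pairwise (fun a b => PySem.Str.len b ≤ PySem.Str.len a) :=
        (List.pairwise_cons.mp hp).2
      simp only [PySem.List.insertBy]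
      by_cases hxy : PySem.Str.len y < PySem.Str.len x
      · -- x is inserted in front of y :: ys
        rw [if_pos (decide_eq_true hxy)]
        rcases hf : (y :: ys).find? P with _ | k0
        · rcases hPx : P x with _ | _
          · rw [List.find?_cons_of_neg (show ¬ P x = true by rw [hPx]; exact Bool.false_ne_true), hf]
            rfl
          · rw [List.find?_cons_of_pos hPx]
            rfl
        · have hk0 : k0 ∈ y :: ys := List.mem_of_find?_eq_some hf
          have hk0len : PySem.Str.len k0 ≤ PySem.Str.len y := by
            rcases List.mem_cons.mp hk0 with h | h
            · subst h; exact le_refl _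
            · exact hy _ h
          have hlt : PySem.Str.len k0 < PySem.Str.len x := lt_of_le_of_lt hk0len hxy
          rcases hPx : P x with _ | _
          · rw [List.find?_cons_of_neg (show ¬ P x = true by rw [hPx]; exact Bool.false_ne_true), hf]
            rfl
          · rw [List.find?_cons_of_pos hPx]
            show some x =
              if (true && decide (PySem.Str.len k0 < PySem.Str.len x)) = true then some x
              else some k0
            rw [decide_eq_true hlt]
            rfl
      · -- x is inserted somewhere behind y
        rw [if_neg (by rw [decide_eq_false hxy]; exact Bool.false_ne_true)]
        rcases hPy : P y with _ | _
        · rw [List.find?_cons_of_neg (show ¬ P y = true by rw [hPy]; exact Bool.false_ne_true),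
            List.find?_cons_of_neg (show ¬ P y = true by rw [hPy]; exact Bool.false_ne_true), ih hp']
        · rw [List.find?_cons_of_pos hPy, List.find?_cons_of_pos hPy]
          show some y =
            if (P x && decide (PySem.Str.len y < PySem.Str.len x)) = true then some x
            else some y
          rw [decide_eq_false hxy, Bool.and_false]
          rfl

-- evaluating one iteration of B's loop body
lemma pvBStep_take (cu : String) (b : Int × String) (kv : String × String)
    (h1 : b.1 < PySem.Str.len kv.1)
    (h2 : PySem.Str.isIn (PySem.Str.upper kv.1) cu = true) :
    pvBStep cu b kv = (PySem.Str.len kv.1, kv.2) := by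
  unfold pvBStep
  rw [if_pos]
  rw [h2, Bool.and_true, decide_eq_true_eq]
  exact h1

lemma pvBStep_skip_short (cu : String) (b : Int × String) (kv : String × String)
    (h1 : ¬ b.1 < PySem.Str.len kv.1) :
    pvBStep cu b kv = b := by
  unfold pvBStep
  rw [if_neg]
  rw [decide_eq_false h1, Bool.false_and]
  exact Bool.false_ne_true

lemma pvBStep_skip_nomatch (cu : String) (b : Int × String) (kv : String × String)
    (h2 : PySem.Str.isIn (PySem.Str.upper kv.1) cu = false) :
    pvBStep cu b kv = b := by
  unfold pvBStep
  rw [if_neg]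
  rw [h2, Bool.and_false]
  exact Bool.false_ne_true

-- one fold step preserves the correspondence with the stable reverse-sorted first match
lemma pv_step (d : PySem.Dict String String) (hnd : d.keys.Nodup) (cu : String)
    (kv : String × String) (hmem : kv ∈ d.items) (s : List String)
    (hp : s.Pairwise (fun a b => PySem.Str.len b ≤ PySem.Str.len a)) :
    pvBStep cu (pvStOf d cu s) kv =
      pvStOf d cu
        (PySem.List.insertBy (fun a b => decide (PySem.Str.len b < PySem.Str.len a)) kv.1 s) := by
  have hget : d.getD kv.1 "" = kv.2 := by
    rcases kv with ⟨k, v⟩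
    exact PySem.Dict.getD_of_mem_items d hmem hnd ""
  unfold pvStOf
  rw [pv_find?_insertBy (pvP cu) kv.1 s hp]
  rcases hf : s.find? (pvP cu) with _ | k0 <;>
    rcases hPx : pvP cu kv.1 with _ | _ <;>
      simp only [pvP] at hPx <;> simp only []
  · -- no match yet, kv does not match: state unchanged
    simp only [Bool.false_eq_true, if_false]
    exact pvBStep_skip_nomatch cu _ kv hPx
  · -- no match yet, kv matches: take it
    simp only [if_true]
    rw [pvBStep_take cu _ kv (lt_of_lt_of_le (by norm_num) (pv_len_nonneg kv.1)) hPx, hget]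
  · -- match k0, kv does not match: state unchanged
    simp only [Bool.false_and, Bool.false_eq_true, if_false]
    exact pvBStep_skip_nomatch cu _ kv hPx
  · -- match k0, kv matches: take kv iff strictly longer
    by_cases hlt : PySem.Str.len k0 < PySem.Str.len kv.1
    · simp only [Bool.true_and, hlt, decide_true, if_true]
      rw [pvBStep_take cu _ kv hlt hPx, hget]
    · simp only [Bool.true_and, hlt, decide_false, Bool.false_eq_true, if_false]
      exact pvBStep_skip_short cu _ kv hlt

-- B's fold over any sublist of the items equals the first-match state of its sorted keys
lemma pv_fold_eq (d : PySem.Dict String String) (hnd : d.keys.Nodup) (cu : String)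
    (p : List (String × String)) (hsub : ∀ kv ∈ p, kv ∈ d.items) :
    p.foldl (pvBStep cu) (-1, pvSETOR) =
      pvStOf d cu (PySem.List.sorted (p.map Prod.fst) (fun k => PySem.Str.len k) true) := by
  induction p using List.reverseRecOn with
  | nil =>
      simp [pvStOf, PySem.List.sorted]
  | append_singleton q kv ih =>
      have hq : ∀ x ∈ q, x ∈ d.items := fun x hx => hsub x (List.mem_append_left _ hx)
      have hkv : kv ∈ d.items := hsub kv (List.mem_append_right _ (List.mem_singleton.mpr rfl))
      rw [List.foldl_append, List.foldl_cons, List.foldl_nil, ih hq]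
      have hsorted :
          PySem.List.sorted ((q ++ [kv]).map Prod.fst) (fun k => PySem.Str.len k) true =
            PySem.List.insertBy (fun a b => decide (PySem.Str.len b < PySem.Str.len a)) kv.1
              (PySem.List.sorted (q.map Prod.fst) (fun k => PySem.Str.len k) true) := by
        rw [PySem.List.sorted_rev_eq_foldl_insertBy, PySem.List.sorted_rev_eq_foldl_insertBy,
          List.map_append, List.foldl_append]
        rfl
      rw [hsorted]
      exact pv_step d hnd cu kv hkv _
        (PySem.List.sorted_pairwise_rev (q.map Prod.fst) (fun k => PySem.Str.len k))

-- ===== VERDICT (by name: the statement is the Claim_ definition above) =====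
theorem infer_sector_from_campaign_py_spec : Claim_equal_infer_sector_from_campaign_py := by
  intro campaign_name mappings _
  unfold Spec_infer_sector_from_campaign_py
  unfold infer_sector_from_campaign_py infer_sector_from_campaign_py_alt
  by_cases hc : campaign_name = ""
  · simp [hc]
  · simp only [hc, if_false]
    set d := PySem.Dict.ofList mappings with hd
    have hnd : d.keys.Nodup := PySem.Dict.nodup_keys_ofList mappings
    set cu := PySem.Str.upper campaign_name
    rw [pv_fold_eq d hnd cu d.items (fun kv h => h)]
    have hkeys : d.items.map Prod.fst = d.keys := rfl
    rw [hkeys, pvALoop_eq_find?]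
    unfold pvStOf
    rcases hf : (PySem.List.sorted d.keys (fun k => PySem.Str.len k) true).find? (pvP cu) with _ | k
  <;> simp
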